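-- pv_equiv track=rewrite | github.com/SRV-JSPA/Construcci-n-Directa-de-AFD-y-ecosistema-de-reconocimiento-de-expresiones-regulares | afn.py | caracteres_escapados
-- ===== SOURCE A (Python) =====
-- def caracteres_escapados(cadena):
--     cadena = cadena.replace(' ', '')
--     nueva_cadena = ''
--     escape = False
--     for char in cadena:
--         if escape:
--             nueva_cadena += '%' + char
--             escape = False
--         else:
--             if char == '\\':
--                 escape = True
--             else:
--                 nueva_cadena += char
--     return nueva_cadena
-- ===== SOURCE B (Python) =====
-- def caracteres_escapados(cadena):
--     parts = cadena.replace(' ', '').split('\\')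
--     out = [parts[0]]
--     k = 1
--     while k < len(parts):
--         p = parts[k]
--         if p:
--             out.append('%' + p)
--             k += 1
--         elif k + 1 < len(parts):
--             # empty part: this backslash escaped the next backslash
--             out.append('%\\' + parts[k + 1])
--             k += 2
--         else:
--             # trailing lone backslash: nothing to escape, dropped
--             k += 1
--     return ''.join(out)
-- ===== Notes on version B (the rewrite author's own statement) =====
-- stated objective: alternative
-- what changed: Instead of A's per-character scan with a boolean escape flag, B splits the space-stripped string on the backslash separator and reassembles the parts: the first part is copied, each later nonempty part gets a percent prefix, an empty later part means the backslash escaped the following backslash separator (two parts consumed), and a trailing empty part (lone trailing backslash) is dropped.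
import Mathlib
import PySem

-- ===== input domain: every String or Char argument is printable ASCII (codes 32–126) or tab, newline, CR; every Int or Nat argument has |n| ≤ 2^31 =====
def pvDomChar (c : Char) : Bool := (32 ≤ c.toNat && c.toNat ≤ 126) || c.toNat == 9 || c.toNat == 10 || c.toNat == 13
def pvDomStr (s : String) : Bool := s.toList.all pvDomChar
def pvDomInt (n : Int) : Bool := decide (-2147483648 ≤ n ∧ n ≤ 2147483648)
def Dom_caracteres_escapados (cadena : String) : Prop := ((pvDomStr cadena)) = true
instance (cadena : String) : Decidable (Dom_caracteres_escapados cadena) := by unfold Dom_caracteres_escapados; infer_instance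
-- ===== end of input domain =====

-- B replaces A's per-character escape-flag scan by split-on-'\\' and part reassembly
-- (objective: alternative algorithm; one join instead of repeated concatenation).

-- ===== PORT A =====
-- one loop iteration of A: state (nueva_cadena, escape)
def pvStepA (st : List Char × Bool) (char : Char) : List Char × Bool :=
  if st.2 then (st.1 ++ ['%', char], false)
  else if char = '\\' then (st.1, true)
  else (st.1 ++ [char], false)

def caracteres_escapados (cadena : String) : String :=
  let cadena' := PySem.Str.replace cadena " " ""
  String.ofList (cadena'.toList.foldl pvStepA ([], false)).1

-- ===== PORT B =====
-- str.split('\\'): returns (first part, remaining parts), mirroring parts[0] / parts[1:]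
def pvSplitB : List Char → List Char × List (List Char)
  | [] => ([], [])
  | c :: rest =>
    let (p, ps) := pvSplitB rest
    if c = '\\' then ([], p :: ps) else (c :: p, ps)

-- B's while loop over parts[1:]: nonempty part → '%'+part; empty part followed by
-- another part → '%\'+next part (two parts consumed); trailing empty part → dropped
def pvJoinB : List (List Char) → List Char
  | [] => []
  | [] :: [] => []
  | [] :: q :: rest2 => '%' :: '\\' :: (q ++ pvJoinB rest2)
  | (c :: p) :: rest => '%' :: c :: (p ++ pvJoinB rest)

def caracteres_escapados_alt (cadena : String) : String :=
  let parts := pvSplitB (PySem.Str.replace cadena " " "").toList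
  String.ofList (parts.1 ++ pvJoinB parts.2)

-- ===== PRECONDITION & SPEC =====
def Spec_caracteres_escapados (cadena : String) (out : String) : Prop := out = caracteres_escapados_alt cadena
instance (cadena : String) (out : String) : Decidable (Spec_caracteres_escapados cadena out) := by unfold Spec_caracteres_escapados; infer_instance

-- ===== CLAIM =====
def Claim_equal_caracteres_escapados : Prop := ∀ (cadena : String), Dom_caracteres_escapados cadena → Spec_caracteres_escapados cadena (caracteres_escapados cadena)

-- ===== LEMMAS AND PROOFS =====
-- proof-only reference function: the escape scan written as plain recursion
def pvGo : List Char → List Char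
  | [] => []
  | c :: rest =>
    if c = '\\' then
      match rest with
      | [] => []
      | c2 :: rest2 => '%' :: c2 :: pvGo rest2
    else c :: pvGo rest

lemma loop_eq_go : ∀ (l : List Char) (acc : List Char),
    (l.foldl pvStepA (acc, false)).1 = acc ++ pvGo l := by
  intro l
  induction l using pvGo.induct with
  | case1 => intro acc; simp [pvGo]
  | case2 => intro acc; simp [List.foldl, pvStepA, pvGo]
  | case3 c2 rest2 ih =>
    intro acc
    calc (List.foldl pvStepA (acc, false) ('\\' :: c2 :: rest2)).1
        = (List.foldl pvStepA (acc ++ ['%', c2], false) rest2).1 := by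
          simp [List.foldl, pvStepA]
      _ = (acc ++ ['%', c2]) ++ pvGo rest2 := ih _
      _ = acc ++ pvGo ('\\' :: c2 :: rest2) := by
          conv_rhs => rw [pvGo.eq_def]
          simp
  | case4 c rest h ih =>
    intro acc
    calc (List.foldl pvStepA (acc, false) (c :: rest)).1
        = (List.foldl pvStepA (acc ++ [c], false) rest).1 := by
          simp [List.foldl, pvStepA, h]
      _ = (acc ++ [c]) ++ pvGo rest := ih _
      _ = acc ++ pvGo (c :: rest) := by
          conv_rhs => rw [pvGo.eq_def]
          simp [h]

lemma split_join_eq_go : ∀ (l : List Char),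
    (pvSplitB l).1 ++ pvJoinB (pvSplitB l).2 = pvGo l := by
  intro l
  induction l using pvGo.induct with
  | case1 => simp [pvSplitB, pvJoinB, pvGo]
  | case2 => simp [pvSplitB, pvJoinB, pvGo]
  | case3 c2 rest2 ih =>
    by_cases h2 : c2 = '\\'
    · subst h2
      obtain ⟨p, ps, hps⟩ : ∃ p ps, pvSplitB rest2 = (p, ps) := ⟨_, _, rfl⟩
      simp [pvSplitB, hps, pvJoinB, pvGo]
      simpa [pvSplitB, hps, pvGo] using ih
    · obtain ⟨p, ps, hps⟩ : ∃ p ps, pvSplitB rest2 = (p, ps) := ⟨_, _, rfl⟩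
      simp [pvSplitB, hps, h2, pvJoinB, pvGo]
      simpa [pvSplitB, hps, pvGo, h2] using ih
  | case4 c rest h ih =>
    obtain ⟨p, ps, hps⟩ : ∃ p ps, pvSplitB rest = (p, ps) := ⟨_, _, rfl⟩
    rw [pvGo.eq_def]
    simp only [pvSplitB, hps, h]
    simpa [pvSplitB, hps] using ih

-- ===== VERDICT =====
theorem caracteres_escapados_spec : Claim_equal_caracteres_escapados := by
  intro cadena _
  unfold Spec_caracteres_escapados caracteres_escapados caracteres_escapados_alt
  simp [loop_eq_go, split_join_eq_go]
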